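-- pv_equiv track=rewrite | github.com/o0fung/toolbox | tools/cheque.py | _convert_group_zh
-- ===== SOURCE A (Python) =====
-- _DIGITS_UPPER = {
--     0: "零",
--     1: "壹",
--     2: "貳",
--     3: "叁",
--     4: "肆",
--     5: "伍",
--     6: "陸",
--     7: "柒",
--     8: "捌",
--     9: "玖",
-- }
--
-- _UNIT_WITHIN_GROUP = ["仟", "佰", "拾", ""]  # thousands, hundreds, tens, ones
--
-- def _convert_group_zh(n: int) -> str:
--     """Convert 0..9999 to HK financial uppercase WITHOUT group unit.
--
--     Rules in this 4-digit scope: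
--     - Use explicit tens: 10 -> 壹拾 (never just 拾).
--     - Collapse consecutive internal zeros into a single 零 between non-zero units.
--     - No leading 零 at the beginning of the group output.
--     """
--     assert 0 <= n <= 9999
--     if n == 0:
--         return ""
--
--     digits = [
--         (n // 1000) % 10,
--         (n // 100) % 10,
--         (n // 10) % 10,
--         n % 10,
--     ]
--
--     parts: list[str] = []
--     zero_pending = False
--     for i, d in enumerate(digits):
--         if d == 0:
--             zero_pending = True
--             continue
--         if zero_pending:
--             # Insert 零 only if something has been emitted in this group already
--             if parts:
--                 parts.append("零")
--             zero_pending = False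
--         parts.append(_DIGITS_UPPER[d] + _UNIT_WITHIN_GROUP[i])
--     return "".join(parts)
-- ===== SOURCE B (Python) =====
-- _DIGITS_UPPER = {
--     0: "\u96f6", 1: "\u58f9", 2: "\u8cb3", 3: "\u53c1", 4: "\u8086",
--     5: "\u4f0d", 6: "\u9678", 7: "\u67d2", 8: "\u634c", 9: "\u7396",
-- }
--
-- _UNIT_WITHIN_GROUP = ["\u4edf", "\u4f70", "\u62fe", ""]
--
--
-- def _convert_group_zh(n: int) -> str:
--     """Build every digit's token (bare零 for zero digits), then normalize:
--     collapse runs of 零 and strip 零 from both ends."""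
--     assert 0 <= n <= 9999
--     digits = [(n // 1000) % 10, (n // 100) % 10, (n // 10) % 10, n % 10]
--     s = "".join(
--         _DIGITS_UPPER[d] + _UNIT_WITHIN_GROUP[i] if d else "\u96f6"
--         for i, d in enumerate(digits)
--     )
--     out = []
--     for ch in s:
--         if ch == "\u96f6" and out and out[-1] == "\u96f6":
--             continue
--         out.append(ch)
--     return "".join(out).strip("\u96f6")
-- ===== Notes on version B (the rewrite author's own statement) =====
-- stated objective: simpler
-- what changed: B emits a token for every digit position (a bare 零 for zero digits) and then normalizes the whole string - collapsing runs of 零 and stripping 零 from both ends - instead of A's stateful loop with a zero_pending flag and conditional emission.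
import Mathlib
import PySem

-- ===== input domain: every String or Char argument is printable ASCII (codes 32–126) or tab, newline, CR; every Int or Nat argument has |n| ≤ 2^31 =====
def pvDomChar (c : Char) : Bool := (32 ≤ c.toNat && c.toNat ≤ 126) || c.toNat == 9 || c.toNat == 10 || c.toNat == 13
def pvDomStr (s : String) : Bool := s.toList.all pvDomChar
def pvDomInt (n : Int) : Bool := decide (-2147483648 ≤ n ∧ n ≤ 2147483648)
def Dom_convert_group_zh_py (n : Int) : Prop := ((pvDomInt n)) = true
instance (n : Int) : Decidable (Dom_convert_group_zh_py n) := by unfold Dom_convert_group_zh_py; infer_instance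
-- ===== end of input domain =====

-- B builds one token per digit position (a bare 零 for zero digits) and then normalizes the whole
-- string (collapse runs of 零, strip 零 at both ends) instead of A's zero_pending-flag loop; objective: simpler.

-- shared module-level tables (Python's _DIGITS_UPPER lookup and _UNIT_WITHIN_GROUP)
def zhDigit (d : Int) : String :=
  if d = 0 then "零" else if d = 1 then "壹" else if d = 2 then "貳" else if d = 3 then "叁"
  else if d = 4 then "肆" else if d = 5 then "伍" else if d = 6 then "陸" else if d = 7 then "柒"
  else if d = 8 then "捌" else "玖"

def zhUnits : List String := ["仟", "佰", "拾", ""]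

-- ===== PORT A =====
-- A's for-loop over enumerate(digits) with the parts / zero_pending state (i is always in range, so getD is exact)
def aLoop : List (Int × Int) → List String → Bool → List String
  | [], parts, _ => parts
  | (i, d) :: rest, parts, zp =>
    if d = 0 then aLoop rest parts true
    else
      let parts' := if zp ∧ parts ≠ [] then parts ++ ["零"] else parts
      aLoop rest (parts' ++ [zhDigit d ++ zhUnits.getD i.toNat ""]) false

def convert_group_zh_py (n : Int) : String :=
  if n = 0 then ""
  else
    let digits : List Int :=
      [PySem.Int.mod (PySem.Int.floordiv n 1000) 10,
       PySem.Int.mod (PySem.Int.floordiv n 100) 10,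
       PySem.Int.mod (PySem.Int.floordiv n 10) 10,
       PySem.Int.mod n 10]
    String.join (aLoop (PySem.List.enumerate digits) [] false)

-- ===== PORT B =====
-- B's one-pass collapse loop: skip a 零 that directly follows a 零 (out[-1] check)
def altCollapse (s : List Char) : List Char :=
  s.foldl (fun out ch =>
    if ch = '零' ∧ out ≠ [] ∧ out.getLast? = some '零' then out else out ++ [ch]) []

-- "".join(out).strip('零'): drop 零 from the front, then from the back
def altStrip (s : List Char) : List Char :=
  ((s.dropWhile (· = '零')).reverse.dropWhile (· = '零')).reverse

def convert_group_zh_py_alt (n : Int) : String :=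
  let digits : List Int :=
    [PySem.Int.mod (PySem.Int.floordiv n 1000) 10,
     PySem.Int.mod (PySem.Int.floordiv n 100) 10,
     PySem.Int.mod (PySem.Int.floordiv n 10) 10,
     PySem.Int.mod n 10]
  let s := String.join ((PySem.List.enumerate digits).map
    (fun p => if p.2 ≠ 0 then zhDigit p.2 ++ zhUnits.getD p.1.toNat "" else "零"))
  String.ofList (altStrip (altCollapse s.toList))

-- ===== PRECONDITION & SPEC =====
-- A's `assert 0 <= n <= 9999` raises AssertionError outside 0..9999; exactly those inputs are excluded.
def Pre_convert_group_zh_py (n : Int) : Prop := 0 ≤ n ∧ n ≤ 9999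
instance (n : Int) : Decidable (Pre_convert_group_zh_py n) := by unfold Pre_convert_group_zh_py; infer_instance
def pvWitness_convert_group_zh_py : Int := (1023)

def Spec_convert_group_zh_py (n : Int) (out : String) : Prop := out = convert_group_zh_py_alt n
instance (n : Int) (out : String) : Decidable (Spec_convert_group_zh_py n out) := by unfold Spec_convert_group_zh_py; infer_instance

-- ===== CLAIM (what is proved, stated in full; the proofs are below) =====
def Claim_equal_convert_group_zh_py : Prop := ∀ (n : Int), Dom_convert_group_zh_py n → Pre_convert_group_zh_py n → Spec_convert_group_zh_py n (convert_group_zh_py n)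

-- ===== LEMMAS AND PROOFS =====
-- a nonzero digit of 0..9 maps to a single character distinct from 零
lemma zh_digit_case (x : Int) (h0 : 0 ≤ x) (h9 : x ≤ 9) :
    x = 0 ∨ ∃ c : Char, c ≠ '零' ∧ zhDigit x = String.ofList [c] ∧ ¬ x = 0 := by
  interval_cases x
  · exact Or.inl rfl
  · exact Or.inr ⟨'壹', by decide, by decide, by decide⟩
  · exact Or.inr ⟨'貳', by decide, by decide, by decide⟩
  · exact Or.inr ⟨'叁', by decide, by decide, by decide⟩
  · exact Or.inr ⟨'肆', by decide, by decide, by decide⟩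
  · exact Or.inr ⟨'伍', by decide, by decide, by decide⟩
  · exact Or.inr ⟨'陸', by decide, by decide, by decide⟩
  · exact Or.inr ⟨'柒', by decide, by decide, by decide⟩
  · exact Or.inr ⟨'捌', by decide, by decide, by decide⟩
  · exact Or.inr ⟨'玖', by decide, by decide, by decide⟩

-- A's loop agrees with B's build-then-normalize on any four digits 0..9 (16 zero-pattern cases)
lemma zh_group_key (a b c d : Int) (ha0 : 0 ≤ a) (ha9 : a ≤ 9) (hb0 : 0 ≤ b) (hb9 : b ≤ 9)
    (hc0 : 0 ≤ c) (hc9 : c ≤ 9) (hd0 : 0 ≤ d) (hd9 : d ≤ 9) :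
    String.join (aLoop (PySem.List.enumerate [a,b,c,d]) [] false)
    = String.ofList (altStrip (altCollapse (String.join ((PySem.List.enumerate [a,b,c,d]).map
        (fun p => if p.2 ≠ 0 then zhDigit p.2 ++ zhUnits.getD p.1.toNat "" else "零"))).toList)) := by
  rcases zh_digit_case a ha0 ha9 with hA | ⟨ca, hca, hza, hA⟩ <;>
  rcases zh_digit_case b hb0 hb9 with hB | ⟨cb, hcb, hzb, hB⟩ <;>
  rcases zh_digit_case c hc0 hc9 with hC | ⟨cc, hcc, hzc, hC⟩ <;>
  rcases zh_digit_case d hd0 hd9 with hD | ⟨cd, hcd, hzd, hD⟩ <;>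
  · apply String.toList_inj.mp
    simp [PySem.List.enumerate, aLoop, altCollapse, altStrip, String.join, List.foldl,
      List.dropWhile, zhUnits, *]

-- ===== VERDICT (by name: the statement is the Claim_ definition above) =====
theorem convert_group_zh_py_spec : Claim_equal_convert_group_zh_py := by
  intro n _ hpre
  rcases hpre with ⟨h1, h2⟩
  show convert_group_zh_py n = convert_group_zh_py_alt n
  by_cases h0 : n = 0
  · subst h0; decide
  · have h10 : (0 : Int) < 10 := by norm_num
    unfold convert_group_zh_py convert_group_zh_py_alt
    rw [if_neg h0]
    exact zh_group_key _ _ _ _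
      (PySem.Int.mod_nonneg _ h10) (by have := PySem.Int.mod_lt (PySem.Int.floordiv n 1000) h10; omega)
      (PySem.Int.mod_nonneg _ h10) (by have := PySem.Int.mod_lt (PySem.Int.floordiv n 100) h10; omega)
      (PySem.Int.mod_nonneg _ h10) (by have := PySem.Int.mod_lt (PySem.Int.floordiv n 10) h10; omega)
      (PySem.Int.mod_nonneg _ h10) (by have := PySem.Int.mod_lt n h10; omega)
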